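-- pv_equiv track=rewrite | github.com/evansanchez963/Regex-to-eNFA-Converter | validate_regex.py | check_operand
-- ===== SOURCE A (Python) =====
-- def check_operand(operand):
--     if(len(operand) < 5):
--         return False
--
--     for i in range(len(operand)):
--         if i == 0 and operand[i] != "[":
--             return False
--         elif (i >= 1 and i <= 3) and not operand[i].isdigit():
--             return False
--         elif i == 4 and operand[i] != "]":
--             return False
--         elif i == 5 and operand[i] not in [".", "U", "*", ")"]:
--             return False
--
--     return True
-- ===== SOURCE B (Python) =====
-- def check_operand(operand):
--     if len(operand) < 5:
--         return False
--     if (operand[0] != "["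
--             or not operand[1].isdigit()
--             or not operand[2].isdigit()
--             or not operand[3].isdigit()
--             or operand[4] != "]"):
--         return False
--     return len(operand) == 5 or operand[5] in ".U*)"
-- ===== Notes on version B (the rewrite author's own statement) =====
-- stated objective: simpler
-- what changed: Replaces the full-length scan (a loop over every index that only ever tests indices 0-5) with direct positional checks of characters 0-5, preserving that index 5 is tested only when the string is longer than 5.
import Mathlib
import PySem

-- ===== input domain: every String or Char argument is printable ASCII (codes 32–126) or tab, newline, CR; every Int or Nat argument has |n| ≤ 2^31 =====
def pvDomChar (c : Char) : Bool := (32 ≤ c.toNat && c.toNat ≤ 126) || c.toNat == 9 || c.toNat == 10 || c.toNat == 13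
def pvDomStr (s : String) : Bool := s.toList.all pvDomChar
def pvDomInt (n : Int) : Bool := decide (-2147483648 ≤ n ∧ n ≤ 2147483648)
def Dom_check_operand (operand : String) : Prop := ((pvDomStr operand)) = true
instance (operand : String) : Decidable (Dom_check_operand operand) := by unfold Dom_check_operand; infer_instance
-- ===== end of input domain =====

-- B changes: the full-length loop is replaced by direct positional checks of characters 0..5 (simpler, O(1) characters examined).

-- ===== PORT A =====
-- the body of A's 'for i in range(len(operand))' loop, with its early returns
def checkLoopA (cs : List Char) : List Int → Bool
  | [] => true
  | i :: rest =>
    if i == 0 && !(PySem.List.pyGet? cs i == some '[') then false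
    else if (decide (1 ≤ i) && decide (i ≤ 3)) && !((PySem.List.pyGet? cs i).any PySem.Chars.isdigit) then false
    else if i == 4 && !(PySem.List.pyGet? cs i == some ']') then false
    else if i == 5 && !(decide (PySem.List.pyGet? cs i ∈ [some '.', some 'U', some '*', some ')'])) then false
    else checkLoopA cs rest

def check_operand (operand : String) : Bool :=
  let cs := operand.toList
  if (PySem.Chars.len cs : Int) < 5 then false
  else checkLoopA cs (PySem.List.pyRange 0 (PySem.Chars.len cs) 1)

-- ===== PORT B =====
def check_operand_alt (operand : String) : Bool :=
  let cs := operand.toList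
  if (PySem.Chars.len cs : Int) < 5 then false
  else if !(PySem.List.pyGet? cs 0 == some '[')
       || !((PySem.List.pyGet? cs 1).any PySem.Chars.isdigit)
       || !((PySem.List.pyGet? cs 2).any PySem.Chars.isdigit)
       || !((PySem.List.pyGet? cs 3).any PySem.Chars.isdigit)
       || !(PySem.List.pyGet? cs 4 == some ']') then false
  else ((PySem.Chars.len cs : Int) == 5) || decide (PySem.List.pyGet? cs 5 ∈ [some '.', some 'U', some '*', some ')'])

-- ===== PRECONDITION & SPEC =====
def Spec_check_operand (operand : String) (out : Bool) : Prop := out = check_operand_alt operand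
instance (operand : String) (out : Bool) : Decidable (Spec_check_operand operand out) := by unfold Spec_check_operand; infer_instance

-- ===== CLAIM (what is proved, stated in full; the proofs are below) =====
def Claim_equal_check_operand : Prop := ∀ (operand : String), Dom_check_operand operand → Spec_check_operand operand (check_operand operand)

-- ===== LEMMAS AND PROOFS =====

theorem checkLoopA_append (cs : List Char) (l1 l2 : List Int) :
    checkLoopA cs (l1 ++ l2) = (checkLoopA cs l1 && checkLoopA cs l2) := by
  induction l1 with
  | nil => simp [checkLoopA]
  | cons i rest ih =>
    simp only [List.cons_append, checkLoopA]
    split_ifs <;> simp [ih]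

theorem checkLoopA_high (cs : List Char) (l : List Int) (h : ∀ i ∈ l, 6 ≤ i) :
    checkLoopA cs l = true := by
  induction l with
  | nil => rfl
  | cons i rest ih =>
    have hi : 6 ≤ i := h i (by simp)
    simp only [checkLoopA]
    have h0 : (i == 0) = false := by simp; omega
    have h3 : decide (i ≤ 3) = false := by simp; omega
    have h4 : (i == 4) = false := by simp; omega
    have h5 : (i == 5) = false := by simp; omega
    simp [h0, h3, h4, h5]
    exact ih (fun j hj => h j (by simp [hj]))

theorem pyRange6 (n : Int) (h : 6 ≤ n) :
    PySem.List.pyRange 0 n 1 = [0, 1, 2, 3, 4, 5] ++ PySem.List.pyRange 6 n 1 := by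
  rw [PySem.List.pyRange_one_cons (by omega : (0:Int) < n)]; norm_num
  rw [PySem.List.pyRange_one_cons (by omega : (1:Int) < n)]; norm_num
  rw [PySem.List.pyRange_one_cons (by omega : (2:Int) < n)]; norm_num
  rw [PySem.List.pyRange_one_cons (by omega : (3:Int) < n)]; norm_num
  rw [PySem.List.pyRange_one_cons (by omega : (4:Int) < n)]; norm_num
  rw [PySem.List.pyRange_one_cons (by omega : (5:Int) < n)]; norm_num

theorem pyRange5 : PySem.List.pyRange 0 5 1 = [0, 1, 2, 3, 4] := by decide

-- ===== VERDICT (by name: the statement is the Claim_ definition above) =====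
theorem check_operand_spec : Claim_equal_check_operand := by
  intro operand _
  unfold Spec_check_operand check_operand check_operand_alt
  simp only [PySem.Chars.len_eq]
  generalize operand.toList = cs
  by_cases hlen : (cs.length : Int) < 5
  · simp [hlen]
  · rw [not_lt] at hlen
    have h5 : 5 ≤ cs.length := by exact_mod_cast hlen
    obtain ⟨c0, c1, c2, c3, c4, rest, hr⟩ :
        ∃ c0 c1 c2 c3 c4 rest, cs = c0 :: c1 :: c2 :: c3 :: c4 :: rest := by
      match cs, h5 with
      | c0 :: c1 :: c2 :: c3 :: c4 :: rest, _ => exact ⟨c0, c1, c2, c3, c4, rest, rfl⟩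
    subst hr
    cases rest with
    | nil =>
      simp only [List.length_cons, List.length_nil]
      norm_num [pyRange5, checkLoopA, PySem.List.pyGet?, PySem.List.pyIdx?]
      cases hb0 : (c0 == '[') <;> cases hb1 : PySem.Chars.isdigit c1 <;>
        cases hb2 : PySem.Chars.isdigit c2 <;> cases hb3 : PySem.Chars.isdigit c3 <;>
        cases hb4 : (c4 == ']') <;> simp [hb2, hb3]
    | cons c5 rest2 =>
      have hn : (6:Int) ≤ ((c0 :: c1 :: c2 :: c3 :: c4 :: c5 :: rest2).length : Int) := by
        simp; omega
      rw [pyRange6 _ hn, checkLoopA_append, checkLoopA_high _ _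
        (fun i hi => ((PySem.List.mem_pyRange_one (a := 6)).mp hi).1)]
      simp only [checkLoopA, Bool.and_true]
      have t0 : (0:Int) ≤ (rest2.length:Int) + 1 + 1 + 1 + 1 + 1 := by omega
      have t1 : (0:Int) ≤ (rest2.length:Int) + 1 + 1 + 1 + 1 := by omega
      have t2 : (2:Int) ≤ (rest2.length:Int) + 1 + 1 + 1 + 1 + 1 := by omega
      have t3 : (3:Int) ≤ (rest2.length:Int) + 1 + 1 + 1 + 1 + 1 := by omega
      have t4 : (4:Int) ≤ (rest2.length:Int) + 1 + 1 + 1 + 1 + 1 := by omega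
      have t5 : (5:Int) ≤ (rest2.length:Int) + 1 + 1 + 1 + 1 + 1 := by omega
      norm_num [PySem.List.pyGet?, PySem.List.pyIdx?, t0, t1, t2, t3, t4, t5]
      have f1 : (decide ((rest2.length:Int) + 1 + 1 + 1 + 1 + 1 + 1 < 5)) = false := by
        simp; omega
      have f2 : (((rest2.length:Int) + 1 + 1 + 1 + 1 + 1 + 1) == 5) = false := by
        simp; omega
      simp [f1, f2, Bool.and_assoc]
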